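-- pv_equiv track=rewrite | github.com/daviolimen/Exercises | Questões/apagando_e_ganhando.py | removeSmallestM
-- ===== SOURCE A (Python) =====
-- def removeSmallestM(arr, N, M):
--     A = []
--     for i in range(N):
--         A.append([arr[i], i])
--     A = sorted(A)
--     B = []
--     for i in range(M, N):
--         B.append([A[i][1], A[i][0]])
--     B = sorted(B)
--     result = [b[1] for b in B]
--     return result
-- ===== SOURCE B (Python) =====
-- def removeSmallestM(arr, N, M):
--     prefix = arr[:N] if N > 0 else []
--     order = sorted(zip(prefix, range(len(prefix))))
--     removed = set(i for _, i in order[:M])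
--     return [v for i, v in enumerate(prefix) if i not in removed]
-- ===== Notes on version B (the rewrite author's own statement) =====
-- stated objective: simpler
-- what changed: B sorts the (value, index) pairs once (as tuples) and replaces A's second sort with a set of removed indices plus a single filtering pass over the prefix in original order.
-- outside the precondition, e.g. on removeSmallestM([3, 1, 2], 3, -1): A returns [3, 3, 1, 2], B returns [3]
import Mathlib
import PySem

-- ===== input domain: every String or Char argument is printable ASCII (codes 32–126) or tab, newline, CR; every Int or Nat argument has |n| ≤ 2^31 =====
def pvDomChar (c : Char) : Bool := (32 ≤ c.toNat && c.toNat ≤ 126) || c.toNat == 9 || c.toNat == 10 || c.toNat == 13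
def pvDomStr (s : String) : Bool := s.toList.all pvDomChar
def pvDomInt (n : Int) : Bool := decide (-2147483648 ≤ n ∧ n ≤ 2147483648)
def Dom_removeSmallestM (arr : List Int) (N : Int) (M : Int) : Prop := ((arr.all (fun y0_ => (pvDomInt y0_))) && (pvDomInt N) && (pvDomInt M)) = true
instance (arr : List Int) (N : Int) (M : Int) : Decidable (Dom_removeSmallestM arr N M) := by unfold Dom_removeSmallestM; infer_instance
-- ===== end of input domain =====

-- B sorts the (value, index) pairs once and replaces A's second sort by a set of
-- removed indices plus a single filtering pass in original order (shorter; one sort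
-- instead of two).

-- ===== PORT A =====
def removeSmallestM (arr : List Int) (N : Int) (M : Int) : List Int :=
  let A1 := (PySem.List.pyRange 0 N 1).foldl
    (fun acc i => acc ++ [(PySem.List.pyGetD arr i 0, i)]) []
  let A2 := PySem.List.sorted2 A1 (fun p => p.1) (fun p => p.2)
  let B1 := (PySem.List.pyRange M N 1).foldl
    (fun acc i => acc ++ [((PySem.List.pyGetD A2 i (0, 0)).2, (PySem.List.pyGetD A2 i (0, 0)).1)]) []
  let B2 := PySem.List.sorted2 B1 (fun p => p.1) (fun p => p.2)
  B2.map (fun b => b.2)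

-- ===== PORT B =====
def removeSmallestM_alt (arr : List Int) (N : Int) (M : Int) : List Int :=
  let pre := if 0 < N then PySem.List.slice arr none (some N) else []
  let order := PySem.List.sorted2 (pre.zip (PySem.List.pyRange 0 (pre.length : Int) 1))
    (fun p => p.1) (fun p => p.2)
  let removed := PySem.Set.ofList ((PySem.List.slice order none (some M)).map (fun p => p.2))
  ((PySem.List.enumerate pre 0).filter (fun p => !(PySem.Set.contains removed p.1))).map (fun p => p.2)

-- ===== PRECONDITION & SPEC =====
-- Pre_ excludes N > len(arr) and M < N ≤ 0, where A raises IndexError, and M < 0 with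
-- 0 < N, where A's range(M, N) negative-index wraparound duplicates elements (or raises).
def Pre_removeSmallestM (arr : List Int) (N : Int) (M : Int) : Prop :=
  N ≤ (arr.length : Int) ∧ (0 ≤ M ∨ (N ≤ 0 ∧ N ≤ M))
instance (arr : List Int) (N : Int) (M : Int) : Decidable (Pre_removeSmallestM arr N M) := by
  unfold Pre_removeSmallestM; infer_instance

def pvWitness_removeSmallestM : List Int × Int × Int := ([3, 1, 2, 1], 4, 2)

def Spec_removeSmallestM (arr : List Int) (N : Int) (M : Int) (out : List Int) : Prop := out = removeSmallestM_alt arr N M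
instance (arr : List Int) (N : Int) (M : Int) (out : List Int) : Decidable (Spec_removeSmallestM arr N M out) := by unfold Spec_removeSmallestM; infer_instance

-- ===== CLAIM (what is proved, stated in full; the proofs are below) =====
def Claim_equal_removeSmallestM : Prop := ∀ (arr : List Int) (N : Int) (M : Int), Dom_removeSmallestM arr N M → Pre_removeSmallestM arr N M → Spec_removeSmallestM arr N M (removeSmallestM arr N M)

-- ===== LEMMAS AND PROOFS =====

-- Python's sort of int pairs (key (fst, snd)) is the sort under the lexicographic order.
lemma sorted2_eq_sorted_toLex (xs : List (Int × Int)) :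
    PySem.List.sorted2 xs (fun p => p.1) (fun p => p.2)
      = PySem.List.sorted xs (fun p => toLex p) := by
  have hbe : (fun a b : Int × Int => decide (a.1 < b.1) || (!decide (b.1 < a.1) && decide (a.2 < b.2)))
      = (fun a b : Int × Int => decide (toLex a < toLex b)) := by
    funext a b
    rcases lt_trichotomy a.1 b.1 with h | h | h
    · simp [Prod.Lex.toLex_lt_toLex, h]
    · simp [Prod.Lex.toLex_lt_toLex, h]
    · simp only [Prod.Lex.toLex_lt_toLex]
      simp [h.ne', not_lt_of_gt h]
      omega
  exact congrArg (fun be : Int × Int → Int × Int → Bool =>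
    xs.foldl (fun acc x => PySem.List.insertBy be x acc) []) hbe

-- Both programs build the same list of (value, index) pairs over the first N elements.
lemma pairs_eq (arr : List Int) (N : Int) (hN : N ≤ (arr.length : Int)) :
    (PySem.List.pyRange 0 N 1).map (fun i => (PySem.List.pyGetD arr i 0, i))
      = (PySem.List.enumerate (arr.take N.toNat) 0).map (fun p => (p.2, p.1)) := by
  have hlen : (arr.take N.toNat).length = N.toNat := by simp; omega
  apply List.ext_getElem
  · simp [PySem.List.length_pyRange_one, PySem.List.length_enumerate, hlen]
  · intro k h1 h2
    have hk : k < N.toNat := by simpa [PySem.List.length_pyRange_one] using h1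
    have hk' : k < arr.length := by omega
    have hkl : k < (PySem.List.enumerate (arr.take N.toNat) 0).length := by
      simpa [PySem.List.length_enumerate, hlen] using hk
    rw [List.getElem_map, List.getElem_map, PySem.List.getElem_pyRange_one,
      PySem.List.getElem_enumerate]
    have h0k : (0 : Int) + (k : Int) = ((k : Nat) : Int) := by omega
    rw [h0k, PySem.List.pyGetD_natCast]
    simp [List.getD_eq_getElem?_getD, List.getElem?_eq_getElem hk', List.getElem_take]

-- zip(prefix, range(len(prefix))) is enumerate with the components swapped.
lemma zip_range_eq (pre : List Int) :
    pre.zip (PySem.List.pyRange 0 (pre.length : Int) 1)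
      = (PySem.List.enumerate pre 0).map (fun p => (p.2, p.1)) := by
  apply List.ext_getElem
  · simp [PySem.List.length_pyRange_one, PySem.List.length_enumerate]
  · intro k h1 h2
    have hk : k < pre.length := by
      simpa [PySem.List.length_enumerate] using h2
    rw [List.getElem_zip, List.getElem_map, PySem.List.getElem_enumerate,
      PySem.List.getElem_pyRange_one]

-- The core step: sorting the kept pairs back by index equals filtering the original
-- enumeration by the set of removed indices.
lemma kept_eq (pre : List Int) (m : Nat)
    (Z S : List (Int × Int))
    (hZ : Z = (PySem.List.enumerate pre 0).map (fun p => (p.2, p.1)))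
    (hS : S = PySem.List.sorted2 Z (fun p => p.1) (fun p => p.2)) :
    PySem.List.sorted2 ((S.drop m).map (fun p => (p.2, p.1))) (fun p => p.1) (fun p => p.2)
      = (PySem.List.enumerate pre 0).filter
          (fun p => !(PySem.Set.contains (PySem.Set.ofList ((S.take m).map (fun p => p.2))) p.1)) := by
  have hswapinj : Function.Injective (fun p : Int × Int => (p.2, p.1)) := by
    intro p q h
    exact Prod.ext (congrArg Prod.snd h) (congrArg Prod.fst h)
  have hperm : S.Perm Z := hS ▸ PySem.List.sorted2_perm Z (fun p => p.1) (fun p => p.2) false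
  have hZsnd : Z.map (fun p => p.2) = PySem.List.pyRange 0 (0 + (pre.length : Int)) 1 := by
    rw [hZ, List.map_map]
    exact PySem.List.map_fst_enumerate pre 0
  have hnodupS2 : (S.map (fun p => p.2)).Nodup := by
    rw [(hperm.map (fun p => p.2)).nodup_iff, hZsnd]
    exact PySem.List.nodup_pyRange_one 0 (0 + (pre.length : Int))
  have hsplit : S.take m ++ S.drop m = S := List.take_append_drop m S
  have hdisj : ∀ i : Int, i ∈ (S.take m).map (fun p => p.2) →
      i ∈ (S.drop m).map (fun p => p.2) → False := by
    have hnd : ((S.take m).map (fun p => p.2) ++ (S.drop m).map (fun p => p.2)).Nodup := by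
      rw [← List.map_append, hsplit]
      exact hnodupS2
    intro i h1 h2
    exact (List.disjoint_of_nodup_append hnd) h1 h2
  have hmemE : ∀ p : Int × Int, p ∈ PySem.List.enumerate pre 0 ↔ (p.2, p.1) ∈ Z := by
    intro p
    rw [hZ]
    constructor
    · intro h
      exact List.mem_map_of_mem h
    · intro h
      rcases List.mem_map.mp h with ⟨r, hr, hrp⟩
      have : r = p := Prod.ext (congrArg Prod.snd hrp) (congrArg Prod.fst hrp)
      rwa [this] at hr
  have hmemiff : ∀ a : Int × Int,
      a ∈ (PySem.List.enumerate pre 0).filter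
        (fun p => !(PySem.Set.contains (PySem.Set.ofList ((S.take m).map (fun p => p.2))) p.1))
      ↔ a ∈ (S.drop m).map (fun p => (p.2, p.1)) := by
    intro a
    rw [List.mem_filter]
    constructor
    · rintro ⟨hE, hnot⟩
      have hnot' : a.1 ∉ (S.take m).map (fun p => p.2) := by
        intro hin
        rw [Bool.not_eq_eq_eq_not, Bool.not_true, ← Bool.not_eq_true,
          PySem.Set.contains_iff, PySem.Set.mem_ofList] at hnot
        exact hnot hin
      have hs : (a.2, a.1) ∈ S := hperm.mem_iff.mpr ((hmemE a).mp hE)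
      rw [← hsplit] at hs
      rcases List.mem_append.mp hs with h | h
      · exact absurd (List.mem_map_of_mem (f := fun p => p.2) h) hnot'
      · exact List.mem_map.mpr ⟨(a.2, a.1), h, by simp⟩
    · intro hmem
      rcases List.mem_map.mp hmem with ⟨q, hq, hqa⟩
      have hqS : q ∈ S := List.mem_of_mem_drop hq
      have hz : q ∈ Z := hperm.mem_iff.mp hqS
      subst hqa
      refine ⟨(hmemE (q.2, q.1)).mpr (by simpa using hz), ?_⟩
      rw [Bool.not_eq_eq_eq_not, Bool.not_true, ← Bool.not_eq_true,
        PySem.Set.contains_iff, PySem.Set.mem_ofList]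
      intro hin
      exact hdisj q.2 (by simpa using hin) (List.mem_map_of_mem (f := fun p => p.2) hq)
  have hpwF : ((PySem.List.enumerate pre 0).filter
      (fun p => !(PySem.Set.contains (PySem.Set.ofList ((S.take m).map (fun p => p.2))) p.1))).Pairwise
      (fun p q => p.1 < q.1) :=
    (PySem.List.pairwise_lt_enumerate pre 0).filter _
  have hndF := hpwF.imp (fun h => ne_of_apply_ne Prod.fst (ne_of_lt h))
  have hndD : ((S.drop m).map (fun p => (p.2, p.1))).Nodup :=
    ((hnodupS2.of_map _).sublist (List.drop_sublist m S)).map hswapinj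
  rw [sorted2_eq_sorted_toLex]
  exact PySem.List.sorted_eq_of_perm_of_pairwise_lt _ _ _
    ((List.perm_ext_iff_of_nodup hndF hndD).mpr hmemiff)
    (hpwF.imp (fun h => Prod.Lex.toLex_lt_toLex.mpr (Or.inl h)))

-- ===== VERDICT (by name: the statement is the Claim_ definition above) =====
theorem removeSmallestM_spec : Claim_equal_removeSmallestM := by
  unfold Claim_equal_removeSmallestM
  intro arr N M _ hPre
  obtain ⟨hNle, hMd⟩ := hPre
  unfold Spec_removeSmallestM removeSmallestM removeSmallestM_alt
  dsimp only
  by_cases hN : 0 < N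
  · -- main case
    have hM : 0 ≤ M := by rcases hMd with h | h <;> omega
    rw [if_pos hN, PySem.List.slice_to arr (le_of_lt hN)]
    simp only [PySem.List.foldl_append_singleton_eq_map, List.nil_append]
    rw [pairs_eq arr N hNle, zip_range_eq (arr.take N.toNat)]
    set pre := arr.take N.toNat with hpre
    set Z := (PySem.List.enumerate pre 0).map (fun p => (p.2, p.1)) with hZ
    set S := PySem.List.sorted2 Z (fun p => p.1) (fun p => p.2) with hS
    have hlenpre : pre.length = N.toNat := by simp [hpre]; omega
    have hlenS : (S.length : Int) = N := by
      have h1 := PySem.List.sorted2_perm Z (fun p => p.1) (fun p => p.2) false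
      have h2 : Z.length = pre.length := by
        simp [hZ, PySem.List.length_enumerate]
      rw [hS, h1.length_eq, h2, hlenpre]
      omega
    have hB1 : (PySem.List.pyRange M N 1).map
        (fun i => ((PySem.List.pyGetD S i (0, 0)).2, (PySem.List.pyGetD S i (0, 0)).1))
        = (S.drop M.toNat).map (fun p => (p.2, p.1)) := by
      have h := PySem.List.map_pyGetD_pyRange' S (0, 0) hM
      rw [hlenS] at h
      calc (PySem.List.pyRange M N 1).map
            (fun i => ((PySem.List.pyGetD S i (0, 0)).2, (PySem.List.pyGetD S i (0, 0)).1))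
          = ((PySem.List.pyRange M N 1).map (fun j => PySem.List.pyGetD S j (0, 0))).map
              (fun p => (p.2, p.1)) := by rw [List.map_map]; rfl
        _ = (S.drop M.toNat).map (fun p => (p.2, p.1)) := by rw [h]
    rw [hB1, PySem.List.slice_to _ hM]
    rw [kept_eq pre M.toNat Z S hZ hS]
  · -- N ≤ 0: both sides are []
    rw [if_neg hN]
    have h1 : PySem.List.pyRange 0 N 1 = [] := PySem.List.pyRange_one_eq_nil (by omega)
    have h2 : PySem.List.pyRange M N 1 = [] := PySem.List.pyRange_one_eq_nil (by omega)
    simp [h1, h2, PySem.List.sorted2, PySem.List.enumerate]
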